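-- pv_equiv track=rewrite | github.com/magnetmomentsco/magnetmomentsco.github.io | scripts/sync-products.py | get_badge
-- ===== SOURCE A (Python) =====
-- def get_badge(product):
--     """Determine badge text from tags."""
--     tags_lower = [t.lower() for t in product.get('tags', [])]
--     if 'bestseller' in tags_lower or 'best seller' in tags_lower:
--         return 'Best Seller'
--     if 'new' in tags_lower:
--         return 'New'
--     if 'sale' in tags_lower:
--         return 'Sale'
--     return None
-- ===== SOURCE B (Python) =====
-- def get_badge(product):
--     """Determine badge text from tags: one pass tracking the best (minimum) priority."""
--     prio = {'bestseller': 0, 'best seller': 0, 'new': 1, 'sale': 2}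
--     best = 3
--     for t in product.get('tags', []):
--         p = prio.get(t.lower(), 3)
--         if p < best:
--             best = p
--     if best == 0:
--         return 'Best Seller'
--     if best == 1:
--         return 'New'
--     if best == 2:
--         return 'Sale'
--     return None
-- ===== Notes on version B (the rewrite author's own statement) =====
-- stated objective: alternative
-- what changed: Replaces the three sequential membership scans over the lowercased tag list with a single pass that tracks the minimum badge priority via a priority map and decodes it afterwards.
import Mathlib
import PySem

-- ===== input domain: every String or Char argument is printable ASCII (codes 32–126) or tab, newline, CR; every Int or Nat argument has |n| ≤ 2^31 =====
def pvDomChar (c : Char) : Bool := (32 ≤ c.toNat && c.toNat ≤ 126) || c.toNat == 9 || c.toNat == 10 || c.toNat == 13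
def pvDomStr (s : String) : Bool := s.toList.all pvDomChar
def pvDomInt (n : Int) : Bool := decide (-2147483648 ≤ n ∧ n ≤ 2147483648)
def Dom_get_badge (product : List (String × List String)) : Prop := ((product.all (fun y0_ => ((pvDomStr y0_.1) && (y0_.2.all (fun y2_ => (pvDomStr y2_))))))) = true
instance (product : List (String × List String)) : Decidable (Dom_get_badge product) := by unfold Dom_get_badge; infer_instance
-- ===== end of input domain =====

-- B changes the decomposition only (three sequential membership scans → one min-priority pass); no speed claim.

-- ===== PORT A =====
def get_badge (product : List (String × List String)) : Option String :=
  let tags_lower := (PySem.Dict.getD ⟨product⟩ "tags" []).map PySem.Str.lower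
  if tags_lower.contains "bestseller" || tags_lower.contains "best seller" then
    some "Best Seller"
  else if tags_lower.contains "new" then
    some "New"
  else if tags_lower.contains "sale" then
    some "Sale"
  else
    none

-- ===== PORT B =====
def get_badge_alt_prio : PySem.Dict String Int :=
  PySem.Dict.ofList [("bestseller", 0), ("best seller", 0), ("new", 1), ("sale", 2)]

def get_badge_alt_loop : List String → Int → Int
  | [], best => best
  | t :: ts, best =>
    let p := PySem.Dict.getD get_badge_alt_prio (PySem.Str.lower t) 3
    get_badge_alt_loop ts (if p < best then p else best)

def get_badge_alt (product : List (String × List String)) : Option String :=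
  let best := get_badge_alt_loop (PySem.Dict.getD ⟨product⟩ "tags" []) 3
  if best = 0 then some "Best Seller"
  else if best = 1 then some "New"
  else if best = 2 then some "Sale"
  else none

-- ===== PRECONDITION & SPEC =====
def Spec_get_badge (product : List (String × List String)) (out : Option String) : Prop := out = get_badge_alt product
instance (product : List (String × List String)) (out : Option String) : Decidable (Spec_get_badge product out) := by unfold Spec_get_badge; infer_instance

-- ===== CLAIM (what is proved, stated in full; the proofs are below) =====
def Claim_equal_get_badge : Prop := ∀ (product : List (String × List String)), Dom_get_badge product → Spec_get_badge product (get_badge product)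

-- ===== LEMMAS AND PROOFS =====

theorem prio_items : (get_badge_alt_prio).items
    = [("bestseller", 0), ("best seller", 0), ("new", 1), ("sale", 2)] := by decide

theorem prio_default (s : String) (e0 : ¬s = "bestseller") (e1 : ¬s = "best seller")
    (e2 : ¬s = "new") (e3 : ¬s = "sale") :
    PySem.Dict.getD get_badge_alt_prio s 3 = 3 := by
  have g0 : ("bestseller" == s) = false := by simp; exact fun h => e0 h.symm
  have g1 : ("best seller" == s) = false := by simp; exact fun h => e1 h.symm
  have g2 : ("new" == s) = false := by simp; exact fun h => e2 h.symm
  have g3 : ("sale" == s) = false := by simp; exact fun h => e3 h.symm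
  simp [PySem.Dict.getD, PySem.Dict.get?, prio_items, List.find?, g0, g1, g2, g3]

theorem prio_bound (s : String) :
    0 ≤ PySem.Dict.getD get_badge_alt_prio s 3 ∧ PySem.Dict.getD get_badge_alt_prio s 3 ≤ 3 := by
  by_cases e0 : s = "bestseller"
  · simp [e0]; decide
  · by_cases e1 : s = "best seller"
    · simp [e1]; decide
    · by_cases e2 : s = "new"
      · simp [e2]; decide
      · by_cases e3 : s = "sale"
        · simp [e3]; decide
        · rw [prio_default s e0 e1 e2 e3]; omega

-- the loop's result is the min of the accumulator and the start-at-3 result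
theorem loop_min (ts : List String) : ∀ b : Int, b ≤ 3 →
    get_badge_alt_loop ts b = min b (get_badge_alt_loop ts 3) := by
  induction ts with
  | nil => intro b hb; simp [get_badge_alt_loop]; omega
  | cons t ts ih =>
    intro b hb
    simp only [get_badge_alt_loop]
    obtain ⟨hp0, hp3⟩ := prio_bound (PySem.Str.lower t)
    have A := ih (if PySem.Dict.getD get_badge_alt_prio (PySem.Str.lower t) 3 < b then
      PySem.Dict.getD get_badge_alt_prio (PySem.Str.lower t) 3 else b) (by omega)
    have B := ih (if PySem.Dict.getD get_badge_alt_prio (PySem.Str.lower t) 3 < 3 then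
      PySem.Dict.getD get_badge_alt_prio (PySem.Str.lower t) 3 else 3) (by omega)
    rw [A, B]
    omega

-- characterisation of the loop result by keyword occurrences among the lowercased tags
theorem loop_char (ts : List String) :
    let m := get_badge_alt_loop ts 3
    (m = 0 ↔ ((∃ a ∈ ts, PySem.Str.lower a = "bestseller") ∨ (∃ a ∈ ts, PySem.Str.lower a = "best seller"))) ∧
    (m ≤ 1 ↔ ((∃ a ∈ ts, PySem.Str.lower a = "bestseller") ∨ (∃ a ∈ ts, PySem.Str.lower a = "best seller") ∨ (∃ a ∈ ts, PySem.Str.lower a = "new"))) ∧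
    (m ≤ 2 ↔ ((∃ a ∈ ts, PySem.Str.lower a = "bestseller") ∨ (∃ a ∈ ts, PySem.Str.lower a = "best seller") ∨ (∃ a ∈ ts, PySem.Str.lower a = "new") ∨ (∃ a ∈ ts, PySem.Str.lower a = "sale"))) ∧
    0 ≤ m ∧ m ≤ 3 := by
  induction ts with
  | nil => simp [get_badge_alt_loop]
  | cons t ts ih =>
    obtain ⟨h0, h1, h2, hm0, hm3⟩ := ih
    simp only [get_badge_alt_loop]
    obtain ⟨hp0, hp3⟩ := prio_bound (PySem.Str.lower t)
    rw [loop_min _ _ (by omega)]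
    by_cases e0 : PySem.Str.lower t = "bestseller"
    · rw [show PySem.Dict.getD get_badge_alt_prio (PySem.Str.lower t) 3 = 0 from by rw [e0]; decide]
      refine ⟨?_, ?_, ?_, by omega, by omega⟩ <;>
        (simp only [List.exists_mem_cons_iff, e0]; try simp) <;>
        all_goals first | omega | (rw [← h0]; omega) | (rw [← h1]; omega) | (rw [← h2]; omega)
    · by_cases e1 : PySem.Str.lower t = "best seller"
      · rw [show PySem.Dict.getD get_badge_alt_prio (PySem.Str.lower t) 3 = 0 from by rw [e1]; decide]
        refine ⟨?_, ?_, ?_, by omega, by omega⟩ <;>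
          (simp only [List.exists_mem_cons_iff, e1]; try simp) <;>
          all_goals first | omega | (rw [← h0]; omega) | (rw [← h1]; omega) | (rw [← h2]; omega)
      · by_cases e2 : PySem.Str.lower t = "new"
        · rw [show PySem.Dict.getD get_badge_alt_prio (PySem.Str.lower t) 3 = 1 from by rw [e2]; decide]
          refine ⟨?_, ?_, ?_, by omega, by omega⟩ <;>
            (simp only [List.exists_mem_cons_iff, e2]; try simp) <;>
            all_goals first | omega | (rw [← h0]; omega) | (rw [← h1]; omega) | (rw [← h2]; omega)
        · by_cases e3 : PySem.Str.lower t = "sale"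
          · rw [show PySem.Dict.getD get_badge_alt_prio (PySem.Str.lower t) 3 = 2 from by rw [e3]; decide]
            refine ⟨?_, ?_, ?_, by omega, by omega⟩ <;>
              (simp only [List.exists_mem_cons_iff, e3]; try simp) <;>
              all_goals first | omega | (rw [← h0]; omega) | (rw [← h1]; omega) | (rw [← h2]; omega)
          · rw [prio_default _ e0 e1 e2 e3]
            refine ⟨?_, ?_, ?_, by omega, by omega⟩ <;>
              (simp only [List.exists_mem_cons_iff]; try simp [e0, e1, e2, e3]) <;>
              all_goals first | omega | (rw [← h0]; omega) | (rw [← h1]; omega) | (rw [← h2]; omega)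

-- ===== VERDICT (by name: the statement is the Claim_ definition above) =====
theorem get_badge_spec : Claim_equal_get_badge := by
  intro product _
  unfold Spec_get_badge get_badge get_badge_alt
  obtain ⟨h0, h1, h2, hm0, hm3⟩ := loop_char (PySem.Dict.getD ⟨product⟩ "tags" [])
  set m := get_badge_alt_loop (PySem.Dict.getD ⟨product⟩ "tags" []) 3 with hm
  simp only [List.contains_eq_mem, List.mem_map, Bool.or_eq_true, decide_eq_true_eq]
  have hcases : m = 0 ∨ m = 1 ∨ m = 2 ∨ m = 3 := by omega
  rcases hcases with h | h | h | h
  · rw [if_pos (h0.mp h), h]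
    norm_num
  · have nc1 : ¬((∃ a ∈ PySem.Dict.getD ⟨product⟩ "tags" [], PySem.Str.lower a = "bestseller") ∨
        (∃ a ∈ PySem.Dict.getD ⟨product⟩ "tags" [], PySem.Str.lower a = "best seller")) :=
      fun hc => by have := h0.mpr hc; omega
    have cnew : ∃ a ∈ PySem.Dict.getD ⟨product⟩ "tags" [], PySem.Str.lower a = "new" := by
      rcases h1.mp (by omega) with hc | hc | hc
      · exact absurd (Or.inl hc) nc1
      · exact absurd (Or.inr hc) nc1
      · exact hc
    rw [if_neg nc1, if_pos cnew, h]
    norm_num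
  · have nc1 : ¬((∃ a ∈ PySem.Dict.getD ⟨product⟩ "tags" [], PySem.Str.lower a = "bestseller") ∨
        (∃ a ∈ PySem.Dict.getD ⟨product⟩ "tags" [], PySem.Str.lower a = "best seller")) :=
      fun hc => by have := h0.mpr hc; omega
    have nc2 : ¬(∃ a ∈ PySem.Dict.getD ⟨product⟩ "tags" [], PySem.Str.lower a = "new") :=
      fun hc => by have := h1.mpr (Or.inr (Or.inr hc)); omega
    have csale : ∃ a ∈ PySem.Dict.getD ⟨product⟩ "tags" [], PySem.Str.lower a = "sale" := by
      rcases h2.mp (by omega) with hc | hc | hc | hc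
      · exact absurd (Or.inl hc) nc1
      · exact absurd (Or.inr hc) nc1
      · exact absurd hc nc2
      · exact hc
    rw [if_neg nc1, if_neg nc2, if_pos csale, h]
    norm_num
  · have nc : ¬((∃ a ∈ PySem.Dict.getD ⟨product⟩ "tags" [], PySem.Str.lower a = "bestseller") ∨
        (∃ a ∈ PySem.Dict.getD ⟨product⟩ "tags" [], PySem.Str.lower a = "best seller") ∨
        (∃ a ∈ PySem.Dict.getD ⟨product⟩ "tags" [], PySem.Str.lower a = "new") ∨
        (∃ a ∈ PySem.Dict.getD ⟨product⟩ "tags" [], PySem.Str.lower a = "sale")) :=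
      fun hc => by have := h2.mpr hc; omega
    rw [if_neg (fun hc => nc (hc.elim (fun x => Or.inl x) (fun x => Or.inr (Or.inl x)) : _)),
      if_neg (fun hc => nc (Or.inr (Or.inr (Or.inl hc)))),
      if_neg (fun hc => nc (Or.inr (Or.inr (Or.inr hc)))), h]
    norm_num
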